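-- pv_equiv track=rewrite | github.com/YasinBoloorchi/DataBase-Polygraph | polygraph.py | draw_polygraph
-- ===== SOURCE A (Python) =====
-- def draw_polygraph(transactions_names, first_read, last_write):
--     # create an empty graph
--     graph = {}
--     for t in transactions_names:
--         graph[t] = {'childs': []}
--
--     # draw lines from first read to the others
--     for t in transactions_names:
--         if t == first_read:
--             transactions_names_temp = transactions_names.copy()
--             transactions_names_temp.remove(t)
--
--             for transaction_name in transactions_names:
--                 if transaction_name != t:
--                     graph[t]['childs'].append(transaction_name)
--
--     # draw lines from other nodes to the last write
--     for t in transactions_names: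
--         if t == last_write:
--             for transaction_name in transactions_names:
--                 if transaction_name != t:
--                     graph[transaction_name]['childs'].append(t)
--
--     # make graph childs set and sorted
--     for t in graph:
--         childs = list(set(graph[t]['childs']))
--         childs.sort()
--         graph[t]['childs'] = childs
--
--     return graph
-- ===== SOURCE B (Python) =====
-- def draw_polygraph(transactions_names, first_read, last_write):
--     # One pass over the de-duplicated node names; each node children list is
--     # assigned directly by case analysis instead of accumulated edge by edge.
--     has_lw = last_write in transactions_names
--     fr_children = sorted(set(transactions_names) - {first_read})
--     graph = {}
--     for t in dict.fromkeys(transactions_names):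
--         if t == first_read:
--             childs = fr_children
--         elif has_lw and t != last_write:
--             childs = [last_write]
--         else:
--             childs = []
--         graph[t] = {'childs': childs}
--     return graph
-- ===== Notes on version B (the rewrite author's own statement) =====
-- stated objective: simpler
-- what changed: Instead of A's four passes (init dict, first-read edge scan, last-write edge scan, then a dedup-and-sort fixup pass over every node), B makes one pass over the de-duplicated names and assigns each node's final child list directly by case analysis (first_read node gets sorted(set(names)-{first_read}), other nodes get [last_write] when last_write occurs in the names, else []).
import Mathlib
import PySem

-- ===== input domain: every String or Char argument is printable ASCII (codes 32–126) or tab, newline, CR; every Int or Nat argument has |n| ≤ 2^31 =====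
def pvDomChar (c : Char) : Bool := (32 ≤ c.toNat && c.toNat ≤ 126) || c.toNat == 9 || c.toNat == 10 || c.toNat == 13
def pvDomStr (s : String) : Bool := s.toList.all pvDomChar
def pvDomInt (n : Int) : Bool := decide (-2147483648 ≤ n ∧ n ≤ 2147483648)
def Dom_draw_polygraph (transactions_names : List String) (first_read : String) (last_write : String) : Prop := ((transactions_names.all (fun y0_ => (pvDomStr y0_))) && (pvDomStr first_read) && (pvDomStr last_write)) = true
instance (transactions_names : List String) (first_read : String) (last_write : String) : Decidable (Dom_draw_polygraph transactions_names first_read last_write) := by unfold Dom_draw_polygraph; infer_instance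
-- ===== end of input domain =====

-- B replaces A's four passes (init, two edge-accumulation scans, dedup-and-sort fixup)
-- by one pass over the de-duplicated names assigning each node's children directly (simpler).

-- ===== PORT A =====
-- graph[k]['childs'].append(x)
def pvAppendChild (g : PySem.Dict String (PySem.Dict String (List String))) (k x : String) : PySem.Dict String (PySem.Dict String (List String)) :=
  PySem.Dict.modify g k PySem.Dict.empty (fun inner => PySem.Dict.modify inner "childs" [] (fun l => l ++ [x]))

-- for t in transactions_names: graph[t] = {'childs': []}
def pvGraph0 (transactions_names : List String) : PySem.Dict String (PySem.Dict String (List String)) :=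
  transactions_names.foldl (fun g t => PySem.Dict.insert g t (PySem.Dict.insert PySem.Dict.empty "childs" ([] : List String))) PySem.Dict.empty

-- draw lines from first read to the others (A also builds the unused copy 'transactions_names_temp' here)
def pvGraph1 (transactions_names : List String) (first_read : String) : PySem.Dict String (PySem.Dict String (List String)) :=
  transactions_names.foldl (fun g t =>
    if t = first_read then
      transactions_names.foldl (fun g' x => if x ≠ t then pvAppendChild g' t x else g') g
    else g) (pvGraph0 transactions_names)

-- draw lines from other nodes to the last write
def pvGraph2 (transactions_names : List String) (first_read : String) (last_write : String) : PySem.Dict String (PySem.Dict String (List String)) :=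
  transactions_names.foldl (fun g t =>
    if t = last_write then
      transactions_names.foldl (fun g' x => if x ≠ t then pvAppendChild g' x t else g') g
    else g) (pvGraph1 transactions_names first_read)

-- for t in graph: graph[t]['childs'] = sorted(list(set(graph[t]['childs'])))
def pvGraph3 (transactions_names : List String) (first_read : String) (last_write : String) : PySem.Dict String (PySem.Dict String (List String)) :=
  (PySem.Dict.keys (pvGraph2 transactions_names first_read last_write)).foldl
    (fun g t => PySem.Dict.modify g t PySem.Dict.empty (fun inner =>
      PySem.Dict.insert inner "childs"
        (PySem.List.sorted (PySem.Set.ofList (PySem.Dict.getD inner "childs" [])) (fun x => x) false)))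
    (pvGraph2 transactions_names first_read last_write)

def draw_polygraph (transactions_names : List String) (first_read : String) (last_write : String) : List (String × List (String × List String)) :=
  (PySem.Dict.items (pvGraph3 transactions_names first_read last_write)).map (fun kv => (kv.1, PySem.Dict.items kv.2))

-- ===== PORT B =====
def draw_polygraph_alt (transactions_names : List String) (first_read : String) (last_write : String) : List (String × List (String × List String)) :=
  let has_lw := transactions_names.contains last_write
  let fr_children := PySem.List.sorted (PySem.Set.diff (PySem.Set.ofList transactions_names) [first_read]) (fun x => x) false
  let graph := (PySem.List.dedup transactions_names).foldl (fun g t =>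
      PySem.Dict.insert g t (PySem.Dict.insert PySem.Dict.empty "childs"
        (if t = first_read then fr_children
         else if has_lw ∧ t ≠ last_write then [last_write]
         else ([] : List String)))) PySem.Dict.empty
  (PySem.Dict.items graph).map (fun kv => (kv.1, PySem.Dict.items kv.2))

-- ===== PRECONDITION & SPEC =====
def Spec_draw_polygraph (transactions_names : List String) (first_read : String) (last_write : String) (out : List (String × List (String × List String))) : Prop := out = draw_polygraph_alt transactions_names first_read last_write
instance (transactions_names : List String) (first_read : String) (last_write : String) (out : List (String × List (String × List String))) : Decidable (Spec_draw_polygraph transactions_names first_read last_write out) := by unfold Spec_draw_polygraph; infer_instance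

-- ===== CLAIM (what is proved, stated in full; the proofs are below) =====
def Claim_equal_draw_polygraph : Prop := ∀ (transactions_names : List String) (first_read : String) (last_write : String), Dom_draw_polygraph transactions_names first_read last_write → Spec_draw_polygraph transactions_names first_read last_write (draw_polygraph transactions_names first_read last_write)

-- ===== LEMMAS AND PROOFS =====

-- the inner dict {'childs': c}
def pvNode (c : List String) : PySem.Dict String (List String) :=
  PySem.Dict.insert PySem.Dict.empty "childs" c

-- the child list of node k (empty dict default where absent)
def pvChilds (g : PySem.Dict String (PySem.Dict String (List String))) (k : String) : List String :=
  PySem.Dict.getD (PySem.Dict.getD g k PySem.Dict.empty) "childs" []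

-- every name of tn is mapped to a single-key inner dict {'childs': …}
def pvShape (tn : List String) (g : PySem.Dict String (PySem.Dict String (List String))) : Prop :=
  ∀ k, k ∈ tn → PySem.Dict.getD g k PySem.Dict.empty = pvNode (pvChilds g k)

theorem pvNode_getD (c : List String) : PySem.Dict.getD (pvNode c) "childs" [] = c := by
  simp [pvNode, PySem.Dict.getD_insert_self]

theorem pvNode_modify (c : List String) (f : List String → List String) :
    PySem.Dict.modify (pvNode c) "childs" [] f = pvNode (f c) := by
  simp [pvNode, PySem.Dict.modify, PySem.Dict.getD_insert_self, PySem.Dict.insert_insert_self]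

theorem pvNode_items (c : List String) : PySem.Dict.items (pvNode c) = [("childs", c)] := by
  simp [pvNode, PySem.Dict.items_insert_of_not_contains, PySem.Dict.contains_empty]
  rfl

theorem pvChilds_appendChild (g : PySem.Dict String (PySem.Dict String (List String))) (t x k : String) :
    pvChilds (pvAppendChild g t x) k = pvChilds g k ++ (if k = t then [x] else []) := by
  unfold pvChilds pvAppendChild
  rw [PySem.Dict.getD_modify]
  by_cases h : k = t
  · subst h
    simp [PySem.Dict.getD_modify_self]
  · simp [h]

theorem pvShape_appendChild (tn : List String) (g : PySem.Dict String (PySem.Dict String (List String)))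
    (t x : String) (hg : pvShape tn g) : pvShape tn (pvAppendChild g t x) := by
  intro k hk
  rw [pvChilds_appendChild]
  unfold pvAppendChild
  rw [PySem.Dict.getD_modify]
  by_cases h : k = t
  · subst h
    rw [if_pos rfl, if_pos rfl, hg k hk, pvNode_modify]
  · rw [if_neg h, if_neg h, List.append_nil]
    exact hg k hk

theorem pvKeys_appendChild (g : PySem.Dict String (PySem.Dict String (List String))) (t x : String)
    (h : t ∈ PySem.Dict.keys g) : PySem.Dict.keys (pvAppendChild g t x) = PySem.Dict.keys g := by
  unfold pvAppendChild
  rw [PySem.Dict.keys_modify, PySem.Dict.keys_insert_of_contains]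
  exact (PySem.Dict.contains_iff_mem_keys g t).2 h

-- inner loop of the first-read pass
theorem pvInner2_spec (t : String) :
    ∀ (l : List String) (g : PySem.Dict String (PySem.Dict String (List String))),
      t ∈ PySem.Dict.keys g →
      PySem.Dict.keys (l.foldl (fun g' x => if x ≠ t then pvAppendChild g' t x else g') g) = PySem.Dict.keys g ∧
      (∀ tn, pvShape tn g → pvShape tn (l.foldl (fun g' x => if x ≠ t then pvAppendChild g' t x else g') g)) ∧
      (∀ k y, y ∈ pvChilds (l.foldl (fun g' x => if x ≠ t then pvAppendChild g' t x else g') g) k ↔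
        y ∈ pvChilds g k ∨ (k = t ∧ y ∈ l ∧ y ≠ t)) := by
  intro l
  induction l with
  | nil => intro g hg; simp
  | cons a l ih =>
    intro g hg
    by_cases ha : a = t
    · subst ha
      rw [List.foldl_cons, if_neg (by simp)]
      obtain ⟨hk, hs, hm⟩ := ih g hg
      refine ⟨hk, hs, ?_⟩
      intro k y
      rw [hm k y]
      aesop
    · rw [List.foldl_cons, if_pos ha]
      have hg' : t ∈ PySem.Dict.keys (pvAppendChild g t a) := by
        rwa [pvKeys_appendChild g t a hg]
      obtain ⟨hk, hs, hm⟩ := ih (pvAppendChild g t a) hg'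
      refine ⟨hk.trans (pvKeys_appendChild g t a hg), fun tn h => hs tn (pvShape_appendChild tn g t a h), ?_⟩
      intro k y
      rw [hm k y, pvChilds_appendChild]
      by_cases hkt : k = t <;> aesop

-- outer loop of the first-read pass
theorem pvOuter2_spec (tn : List String) (fr : String) :
    ∀ (l : List String) (g : PySem.Dict String (PySem.Dict String (List String))),
      (∀ y, y ∈ tn → y ∈ PySem.Dict.keys g) → (∀ y, y ∈ l → y ∈ tn) →
      PySem.Dict.keys (l.foldl (fun g t => if t = fr then tn.foldl (fun g' x => if x ≠ t then pvAppendChild g' t x else g') g else g) g) = PySem.Dict.keys g ∧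
      (pvShape tn g → pvShape tn (l.foldl (fun g t => if t = fr then tn.foldl (fun g' x => if x ≠ t then pvAppendChild g' t x else g') g else g) g)) ∧
      (∀ k y, y ∈ pvChilds (l.foldl (fun g t => if t = fr then tn.foldl (fun g' x => if x ≠ t then pvAppendChild g' t x else g') g else g) g) k ↔
        y ∈ pvChilds g k ∨ (fr ∈ l ∧ k = fr ∧ y ∈ tn ∧ y ≠ fr)) := by
  intro l
  induction l with
  | nil => intro g _ _; simp
  | cons a l ih =>
    intro g hkeys hsub
    by_cases ha : a = fr
    · subst ha
      rw [List.foldl_cons, if_pos rfl]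
      have hfr : a ∈ PySem.Dict.keys g := hkeys a (hsub a (List.mem_cons_self ..))
      obtain ⟨ik, is, im⟩ := pvInner2_spec a tn g hfr
      have hkeys' : ∀ y, y ∈ tn → y ∈ PySem.Dict.keys (tn.foldl (fun g' x => if x ≠ a then pvAppendChild g' a x else g') g) := by
        intro y hy; rw [ik]; exact hkeys y hy
      obtain ⟨ok, os, om⟩ := ih _ hkeys' (fun y hy => hsub y (List.mem_cons_of_mem _ hy))
      refine ⟨ok.trans ik, fun h => os (is tn h), ?_⟩
      intro k y
      rw [om k y, im k y]
      aesop
    · rw [List.foldl_cons, if_neg ha]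
      obtain ⟨ok, os, om⟩ := ih g hkeys (fun y hy => hsub y (List.mem_cons_of_mem _ hy))
      refine ⟨ok, os, ?_⟩
      intro k y
      rw [om k y]
      aesop

-- inner loop of the last-write pass
theorem pvInner3_spec (t : String) :
    ∀ (l : List String) (g : PySem.Dict String (PySem.Dict String (List String))),
      (∀ y, y ∈ l → y ∈ PySem.Dict.keys g) →
      PySem.Dict.keys (l.foldl (fun g' x => if x ≠ t then pvAppendChild g' x t else g') g) = PySem.Dict.keys g ∧
      (∀ tn, pvShape tn g → pvShape tn (l.foldl (fun g' x => if x ≠ t then pvAppendChild g' x t else g') g)) ∧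
      (∀ k y, y ∈ pvChilds (l.foldl (fun g' x => if x ≠ t then pvAppendChild g' x t else g') g) k ↔
        y ∈ pvChilds g k ∨ (y = t ∧ k ∈ l ∧ k ≠ t)) := by
  intro l
  induction l with
  | nil => intro g _; simp
  | cons a l ih =>
    intro g hkeys
    by_cases ha : a = t
    · subst ha
      rw [List.foldl_cons, if_neg (by simp)]
      obtain ⟨hk, hs, hm⟩ := ih g (fun y hy => hkeys y (List.mem_cons_of_mem _ hy))
      refine ⟨hk, hs, ?_⟩
      intro k y
      rw [hm k y]
      aesop
    · rw [List.foldl_cons, if_pos ha]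
      have hag : a ∈ PySem.Dict.keys g := hkeys a (List.mem_cons_self ..)
      have hkeys' : ∀ y, y ∈ l → y ∈ PySem.Dict.keys (pvAppendChild g a t) := by
        intro y hy; rw [pvKeys_appendChild g a t hag]; exact hkeys y (List.mem_cons_of_mem _ hy)
      obtain ⟨hk, hs, hm⟩ := ih (pvAppendChild g a t) hkeys'
      refine ⟨hk.trans (pvKeys_appendChild g a t hag), fun tn h => hs tn (pvShape_appendChild tn g a t h), ?_⟩
      intro k y
      rw [hm k y, pvChilds_appendChild]
      by_cases hka : k = a <;> aesop

-- outer loop of the last-write pass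
theorem pvOuter3_spec (tn : List String) (lw : String) :
    ∀ (l : List String) (g : PySem.Dict String (PySem.Dict String (List String))),
      (∀ y, y ∈ tn → y ∈ PySem.Dict.keys g) → (∀ y, y ∈ l → y ∈ tn) →
      PySem.Dict.keys (l.foldl (fun g t => if t = lw then tn.foldl (fun g' x => if x ≠ t then pvAppendChild g' x t else g') g else g) g) = PySem.Dict.keys g ∧
      (pvShape tn g → pvShape tn (l.foldl (fun g t => if t = lw then tn.foldl (fun g' x => if x ≠ t then pvAppendChild g' x t else g') g else g) g)) ∧
      (∀ k y, y ∈ pvChilds (l.foldl (fun g t => if t = lw then tn.foldl (fun g' x => if x ≠ t then pvAppendChild g' x t else g') g else g) g) k ↔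
        y ∈ pvChilds g k ∨ (lw ∈ l ∧ y = lw ∧ k ∈ tn ∧ k ≠ lw)) := by
  intro l
  induction l with
  | nil => intro g _ _; simp
  | cons a l ih =>
    intro g hkeys hsub
    by_cases ha : a = lw
    · subst ha
      rw [List.foldl_cons, if_pos rfl]
      obtain ⟨ik, is, im⟩ := pvInner3_spec a tn g (fun y hy => hkeys y hy)
      have hkeys' : ∀ y, y ∈ tn → y ∈ PySem.Dict.keys (tn.foldl (fun g' x => if x ≠ a then pvAppendChild g' x a else g') g) := by
        intro y hy; rw [ik]; exact hkeys y hy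
      obtain ⟨ok, os, om⟩ := ih _ hkeys' (fun y hy => hsub y (List.mem_cons_of_mem _ hy))
      refine ⟨ok.trans ik, fun h => os (is tn h), ?_⟩
      intro k y
      rw [om k y, im k y]
      aesop
    · rw [List.foldl_cons, if_neg ha]
      obtain ⟨ok, os, om⟩ := ih g hkeys (fun y hy => hsub y (List.mem_cons_of_mem _ hy))
      refine ⟨ok, os, ?_⟩
      intro k y
      rw [om k y]
      aesop

-- the initialisation pass
theorem pvGraph0_getD (k : String) :
    ∀ (l : List String) (g : PySem.Dict String (PySem.Dict String (List String))),
      PySem.Dict.getD (l.foldl (fun g t => PySem.Dict.insert g t (PySem.Dict.insert PySem.Dict.empty "childs" ([] : List String))) g) k PySem.Dict.empty =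
        if k ∈ l then pvNode [] else PySem.Dict.getD g k PySem.Dict.empty := by
  intro l
  induction l with
  | nil => intro g; simp
  | cons a l ih =>
    intro g
    simp only [List.foldl_cons, ih, PySem.Dict.getD_insert, List.mem_cons]
    by_cases hl : k ∈ l
    · simp [hl]
    · by_cases hk : k = a <;> simp [hl, hk, pvNode]

theorem pvChilds_graph0 (tn : List String) (k : String) : pvChilds (pvGraph0 tn) k = [] := by
  unfold pvChilds pvGraph0
  rw [pvGraph0_getD]
  by_cases h : k ∈ tn
  · simp [h, pvNode_getD]
  · simp [h, PySem.Dict.getD_empty]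

theorem pvShape_graph0 (tn : List String) : pvShape tn (pvGraph0 tn) := by
  intro k hk
  rw [pvChilds_graph0]
  unfold pvGraph0
  rw [pvGraph0_getD, if_pos hk]

theorem pvKeys_graph0 (tn : List String) : PySem.Dict.keys (pvGraph0 tn) = PySem.Set.ofList tn := by
  unfold pvGraph0
  rw [PySem.Dict.keys_foldl_insert tn (fun _ _ => PySem.Dict.insert PySem.Dict.empty "childs" ([] : List String)) PySem.Dict.empty]
  simp [PySem.Dict.keys_empty, PySem.Set.update, PySem.Set.ofList_eq_foldl]

-- combined facts about the graph after both edge passes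
theorem pvGraph2_facts (tn : List String) (fr lw : String) :
    PySem.Dict.keys (pvGraph2 tn fr lw) = PySem.Set.ofList tn ∧
    pvShape tn (pvGraph2 tn fr lw) ∧
    (∀ k y, y ∈ pvChilds (pvGraph2 tn fr lw) k ↔
      (fr ∈ tn ∧ k = fr ∧ y ∈ tn ∧ y ≠ fr) ∨ (lw ∈ tn ∧ y = lw ∧ k ∈ tn ∧ k ≠ lw)) := by
  have hk0 := pvKeys_graph0 tn
  have hmem0 : ∀ y, y ∈ tn → y ∈ PySem.Dict.keys (pvGraph0 tn) := by
    intro y hy; rw [hk0]; exact (PySem.Set.mem_ofList tn y).2 hy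
  obtain ⟨k1, s1, m1⟩ := pvOuter2_spec tn fr tn (pvGraph0 tn) hmem0 (fun _ h => h)
  have hmem1 : ∀ y, y ∈ tn → y ∈ PySem.Dict.keys (pvGraph1 tn fr) := by
    intro y hy; unfold pvGraph1; rw [k1]; exact hmem0 y hy
  obtain ⟨k2, s2, m2⟩ := pvOuter3_spec tn lw tn (pvGraph1 tn fr) hmem1 (fun _ h => h)
  refine ⟨?_, s2 (s1 (pvShape_graph0 tn)), ?_⟩
  · show PySem.Dict.keys (pvGraph2 tn fr lw) = _
    unfold pvGraph2
    rw [k2]; unfold pvGraph1; rw [k1, hk0]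
  · intro k y
    show y ∈ pvChilds (pvGraph2 tn fr lw) k ↔ _
    unfold pvGraph2
    rw [m2 k y]
    show y ∈ pvChilds (pvGraph1 tn fr) k ∨ _ ↔ _
    unfold pvGraph1
    rw [m1 k y, pvChilds_graph0]
    simp only [List.not_mem_nil, false_or]

-- the dedup-and-sort pass, per key
theorem pvPhase4_getD (k : String) :
    ∀ (l : List String), l.Nodup →
      ∀ (g : PySem.Dict String (PySem.Dict String (List String))),
      PySem.Dict.getD (l.foldl (fun g t => PySem.Dict.modify g t PySem.Dict.empty (fun inner =>
          PySem.Dict.insert inner "childs"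
            (PySem.List.sorted (PySem.Set.ofList (PySem.Dict.getD inner "childs" [])) (fun x => x) false))) g) k PySem.Dict.empty =
        if k ∈ l then
          PySem.Dict.insert (PySem.Dict.getD g k PySem.Dict.empty) "childs"
            (PySem.List.sorted (PySem.Set.ofList (PySem.Dict.getD (PySem.Dict.getD g k PySem.Dict.empty) "childs" [])) (fun x => x) false)
        else PySem.Dict.getD g k PySem.Dict.empty := by
  intro l
  induction l with
  | nil => intro _ g; simp
  | cons a l ih =>
    intro hnd g
    have hal : a ∉ l := (List.nodup_cons.1 hnd).1
    simp only [List.foldl_cons]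
    rw [ih (List.nodup_cons.1 hnd).2]
    by_cases hl : k ∈ l
    · have hka : k ≠ a := fun h => hal (h ▸ hl)
      simp only [List.mem_cons, hl, or_true, if_pos]
      rw [PySem.Dict.getD_modify]
      simp [hka]
    · rw [PySem.Dict.getD_modify]
      by_cases hk : k = a
      · subst hk
        simp [hl]
      · simp [hk, hl, List.mem_cons]

theorem pvSet_update_self (l : List String) :
    ∀ (s : List String), (∀ x, x ∈ l → x ∈ s) → PySem.Set.update s l = s := by
  induction l with
  | nil => intro s _; rfl
  | cons a l ih =>
    intro s hs
    show PySem.Set.update (PySem.Set.add s a) l = s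
    have : PySem.Set.add s a = s := by
      unfold PySem.Set.add
      rw [if_pos]
      simp only [PySem.Set.contains, List.contains_iff_mem]
      exact hs a (List.mem_cons_self ..)
    rw [this]
    exact ih s (fun x hx => hs x (List.mem_cons_of_mem _ hx))

-- a nodup list with exactly one member is a singleton
theorem pvNodup_singleton {l : List String} {a : String} (hnd : l.Nodup)
    (h : ∀ x, x ∈ l ↔ x = a) : l = [a] := by
  match l, hnd with
  | [], _ => exact absurd ((h a).2 rfl) (List.not_mem_nil)
  | [x], _ => rw [(h x).1 (List.mem_cons_self ..)]
  | x :: y :: l, hnd =>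
    exfalso
    have hx := (h x).1 (List.mem_cons_self ..)
    have hy := (h y).1 (List.mem_cons_of_mem _ (List.mem_cons_self ..))
    exact (List.nodup_cons.1 hnd).1 (by rw [hx, ← hy]; exact List.mem_cons_self ..)

-- a nodup list with no member is empty
theorem pvNodup_nil {l : List String} (h : ∀ x, ¬ x ∈ l) : l = [] :=
  List.eq_nil_iff_forall_not_mem.2 h

-- what B stores as the child list of node k
theorem pvAlt_childs_eq (tn : List String) (fr lw : String) (k : String) (hk : k ∈ tn) :
    PySem.List.sorted (PySem.Set.ofList (pvChilds (pvGraph2 tn fr lw) k)) (fun x => x) false =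
      (if k = fr then PySem.List.sorted (PySem.Set.diff (PySem.Set.ofList tn) [fr]) (fun x => x) false
       else if tn.contains lw ∧ k ≠ lw then [lw]
       else []) := by
  obtain ⟨_, _, hm⟩ := pvGraph2_facts tn fr lw
  by_cases hkf : k = fr
  · subst hkf
    rw [if_pos rfl]
    apply PySem.List.sorted_eq_sorted_of_perm _ _ _ (fun a b h => h)
    have hnd2 : (PySem.Set.diff (PySem.Set.ofList tn) [k]).Nodup :=
      (PySem.Set.nodup_ofList tn).filter _
    rw [List.perm_ext_iff_of_nodup (PySem.Set.nodup_ofList _) hnd2]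
    intro y
    rw [PySem.Set.mem_ofList, hm k y]
    simp only [PySem.Set.diff, List.mem_filter, PySem.Set.mem_ofList, PySem.Set.contains]
    aesop
  · rw [if_neg hkf]
    by_cases hcond : lw ∈ tn ∧ k ≠ lw
    · obtain ⟨hlw, hklw⟩ := hcond
      rw [if_pos ⟨by simpa [List.contains_iff_mem] using hlw, hklw⟩]
      have hone : ∀ x, x ∈ PySem.Set.ofList (pvChilds (pvGraph2 tn fr lw) k) ↔ x = lw := by
        intro x
        rw [PySem.Set.mem_ofList, hm k x]
        constructor
        · rintro (⟨_, h1, _⟩ | ⟨_, h1, _⟩)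
          · exact absurd h1 hkf
          · exact h1
        · rintro rfl
          exact Or.inr ⟨hlw, rfl, hk, hklw⟩
      rw [pvNodup_singleton (PySem.Set.nodup_ofList _) hone]
      exact PySem.List.sorted_eq_self_of_pairwise _ _ (List.pairwise_singleton _ _)
    · rw [if_neg (by
        rintro ⟨h1, h2⟩
        exact hcond ⟨by simpa [List.contains_iff_mem] using h1, h2⟩)]
      have hnone : ∀ x, ¬ x ∈ PySem.Set.ofList (pvChilds (pvGraph2 tn fr lw) k) := by
        intro x hx
        rw [PySem.Set.mem_ofList, hm k x] at hx
        rcases hx with ⟨_, h1, _⟩ | ⟨h0, _, _, h3⟩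
        · exact hkf h1
        · exact hcond ⟨h0, h3⟩
      rw [pvNodup_nil hnone]
      rfl

-- A's output as a map over the distinct names
theorem pvA_eq_map (tn : List String) (fr lw : String) :
    draw_polygraph tn fr lw =
      (PySem.Set.ofList tn).map (fun k =>
        (k, [("childs", PySem.List.sorted (PySem.Set.ofList (pvChilds (pvGraph2 tn fr lw) k)) (fun x => x) false)])) := by
  obtain ⟨hkeys, hshape, _⟩ := pvGraph2_facts tn fr lw
  have hkeys3 : PySem.Dict.keys (pvGraph3 tn fr lw) = PySem.Set.ofList tn := by
    unfold pvGraph3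
    rw [PySem.Dict.keys_foldl_modify _ PySem.Dict.empty
      (fun _ _ inner => PySem.Dict.insert inner "childs"
        (PySem.List.sorted (PySem.Set.ofList (PySem.Dict.getD inner "childs" [])) (fun x => x) false))]
    rw [hkeys, pvSet_update_self _ _ (fun x hx => hx)]
  have hnd3 : (PySem.Dict.keys (pvGraph3 tn fr lw)).Nodup := by
    rw [hkeys3]; exact PySem.Set.nodup_ofList tn
  unfold draw_polygraph
  rw [PySem.Dict.items_eq_map_keys _ hnd3 PySem.Dict.empty, hkeys3, List.map_map]
  apply List.map_congr_left
  intro k hk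
  have hk' : k ∈ tn := (PySem.Set.mem_ofList tn k).1 hk
  have hgd : PySem.Dict.getD (pvGraph3 tn fr lw) k PySem.Dict.empty =
      PySem.Dict.insert (PySem.Dict.getD (pvGraph2 tn fr lw) k PySem.Dict.empty) "childs"
        (PySem.List.sorted (PySem.Set.ofList (PySem.Dict.getD (PySem.Dict.getD (pvGraph2 tn fr lw) k PySem.Dict.empty) "childs" [])) (fun x => x) false) := by
    unfold pvGraph3
    rw [pvPhase4_getD k _ (by rw [hkeys]; exact PySem.Set.nodup_ofList tn), if_pos (by rwa [hkeys])]
  have hnode := hshape k hk'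
  simp only [Function.comp_apply, hgd, hnode, pvNode_getD]
  have : PySem.Dict.insert (pvNode (pvChilds (pvGraph2 tn fr lw) k)) "childs"
      (PySem.List.sorted (PySem.Set.ofList (pvChilds (pvGraph2 tn fr lw) k)) (fun x => x) false) =
      pvNode (PySem.List.sorted (PySem.Set.ofList (pvChilds (pvGraph2 tn fr lw) k)) (fun x => x) false) := by
    simp [pvNode, PySem.Dict.insert_insert_self]
  rw [this, pvNode_items]

-- B's output as a map over the distinct names
theorem pvB_eq_map (tn : List String) (fr lw : String) :
    draw_polygraph_alt tn fr lw =
      (PySem.Set.ofList tn).map (fun k =>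
        (k, [("childs",
          (if k = fr then PySem.List.sorted (PySem.Set.diff (PySem.Set.ofList tn) [fr]) (fun x => x) false
           else if tn.contains lw ∧ k ≠ lw then [lw]
           else []))])) := by
  unfold draw_polygraph_alt
  dsimp only
  rw [PySem.List.dedup_eq_ofList]
  rw [PySem.Dict.items_foldl_insert_fresh (PySem.Set.ofList tn) (fun t => t) _ PySem.Dict.empty
    (fun a _ => PySem.Dict.contains_empty a) (by simp [PySem.Set.nodup_ofList tn])]
  rw [show PySem.Dict.items (PySem.Dict.empty : PySem.Dict String (PySem.Dict String (List String))) = [] from rfl]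
  simp only [List.nil_append, List.map_map]
  apply List.map_congr_left
  intro k _
  simp only [Function.comp_apply]
  rw [show (PySem.Dict.insert PySem.Dict.empty "childs"
      (if k = fr then _ else if (tn.contains lw : Prop) ∧ k ≠ lw then [lw] else [])) = pvNode _ from rfl, pvNode_items]

-- ===== VERDICT (by name: the statement is the Claim_ definition above) =====
theorem draw_polygraph_spec : Claim_equal_draw_polygraph := by
  intro tn fr lw _
  show draw_polygraph tn fr lw = draw_polygraph_alt tn fr lw
  rw [pvA_eq_map, pvB_eq_map]
  apply List.map_congr_left
  intro k hk
  rw [pvAlt_childs_eq tn fr lw k ((PySem.Set.mem_ofList tn k).1 hk)]
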